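-- pv_equiv track=rewrite | github.com/hashkrish/elastic_modulus_python_md | .ipynb_checkpoints/main_jupyter-checkpoint.py | length_of_growth_at_steps_fn
-- ===== SOURCE A (Python) =====
-- N_steps = 10
--
-- def length_of_growth_at_steps_fn(delx_p_mean_temp,delx_q_mean_temp):
--     length_of_growth_at_steps_temp = []
--     for i in range(N_steps):
--         delX_p_mean = sum(delx_p_mean_temp[0:i+1])
--         delX_q_mean = sum(delx_q_mean_temp[0:i+1])
--         delX_mean = delX_p_mean + delX_q_mean
--         length_of_growth_at_steps_temp.append(delX_mean)
--     return length_of_growth_at_steps_temp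
-- ===== SOURCE B (Python) =====
-- N_steps = 10
--
-- def length_of_growth_at_steps_fn(delx_p_mean_temp, delx_q_mean_temp):
--     # Per-step increments at the 10 fixed steps, then one cumulative-sum pass.
--     steps = [0] * N_steps
--     for i, x in enumerate(delx_p_mean_temp[:N_steps]):
--         steps[i] += x
--     for i, x in enumerate(delx_q_mean_temp[:N_steps]):
--         steps[i] += x
--     out = []
--     total = 0
--     for s in steps:
--         total += s
--         out.append(total)
--     return out
-- ===== Notes on version B (the rewrite author's own statement) =====
-- stated objective: alternative
-- what changed: Instead of re-summing the slices delx[0:i+1] at every step, B scatters each input's first N_steps values into a zero-initialised per-step increment array and then takes a single cumulative-sum pass over it; N_steps is fixed at 10, so both cost the same and this is a different decomposition, not a speedup.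
import Mathlib
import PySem

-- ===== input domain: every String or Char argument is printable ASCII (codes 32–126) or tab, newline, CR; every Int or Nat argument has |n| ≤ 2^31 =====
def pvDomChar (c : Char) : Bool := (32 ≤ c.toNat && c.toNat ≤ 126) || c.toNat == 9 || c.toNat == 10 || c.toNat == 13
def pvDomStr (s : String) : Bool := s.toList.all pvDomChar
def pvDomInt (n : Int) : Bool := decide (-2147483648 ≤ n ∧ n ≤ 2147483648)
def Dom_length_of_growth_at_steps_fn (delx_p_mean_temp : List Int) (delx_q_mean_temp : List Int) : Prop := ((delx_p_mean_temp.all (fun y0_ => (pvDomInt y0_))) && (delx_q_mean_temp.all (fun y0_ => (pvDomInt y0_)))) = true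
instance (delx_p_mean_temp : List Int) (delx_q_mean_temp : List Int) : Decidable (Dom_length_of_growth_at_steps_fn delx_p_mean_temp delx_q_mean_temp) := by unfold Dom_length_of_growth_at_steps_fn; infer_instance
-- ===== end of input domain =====

-- B builds the 10 per-step increments into a fixed zero-initialised array and takes one
-- cumulative-sum pass, instead of A's per-step re-summation of the slice delx[0:i+1]
-- (alternative decomposition; N_steps = 10 is fixed).

-- ===== PORT A =====
-- literal port of A: for i in range(10), sum the slices [0:i+1] and append
def length_of_growth_at_steps_fn (delx_p_mean_temp : List Int) (delx_q_mean_temp : List Int) : List Int :=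
  (PySem.List.pyRange 0 10 1).foldl
    (fun acc i =>
      let delX_p_mean := (PySem.List.slice delx_p_mean_temp (some 0) (some (i + 1))).sum
      let delX_q_mean := (PySem.List.slice delx_q_mean_temp (some 0) (some (i + 1))).sum
      let delX_mean := delX_p_mean + delX_q_mean
      acc ++ [delX_mean]) []

-- ===== PORT B =====
-- port of B's 'for i, x in enumerate(xs[:N_steps]): steps[i] += x' loop; the enumerate
-- index is a nonnegative Int, so .toNat is exact here
def pvAddInto (steps : List Int) (xs : List Int) : List Int :=
  (PySem.List.enumerate xs).foldl
    (fun s ix => s.set ix.1.toNat (s.getD ix.1.toNat 0 + ix.2)) steps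

def length_of_growth_at_steps_fn_alt (delx_p_mean_temp : List Int) (delx_q_mean_temp : List Int) : List Int :=
  ((pvAddInto (pvAddInto (List.replicate 10 (0 : Int))
        (PySem.List.slice delx_p_mean_temp none (some 10)))
      (PySem.List.slice delx_q_mean_temp none (some 10))).foldl
    (fun (st : Int × List Int) s => (st.1 + s, st.2 ++ [st.1 + s])) (0, [])).2

-- ===== PRECONDITION & SPEC =====
def Spec_length_of_growth_at_steps_fn (delx_p_mean_temp : List Int) (delx_q_mean_temp : List Int) (out : List Int) : Prop := out = length_of_growth_at_steps_fn_alt delx_p_mean_temp delx_q_mean_temp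
instance (delx_p_mean_temp : List Int) (delx_q_mean_temp : List Int) (out : List Int) : Decidable (Spec_length_of_growth_at_steps_fn delx_p_mean_temp delx_q_mean_temp out) := by unfold Spec_length_of_growth_at_steps_fn; infer_instance

-- ===== CLAIM (what is proved, stated in full; the proofs are below) =====
def Claim_equal_length_of_growth_at_steps_fn : Prop := ∀ (delx_p_mean_temp : List Int) (delx_q_mean_temp : List Int), Dom_length_of_growth_at_steps_fn delx_p_mean_temp delx_q_mean_temp → Spec_length_of_growth_at_steps_fn delx_p_mean_temp delx_q_mean_temp (length_of_growth_at_steps_fn delx_p_mean_temp delx_q_mean_temp)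

-- ===== LEMMAS AND PROOFS =====

-- A's side: the loop body's slice is a take; the whole loop is a map over [0..9]
theorem pvA_eq_map (p q : List Int) :
    length_of_growth_at_steps_fn p q
      = (List.range' 1 10).map (fun k => (p.take k).sum + (q.take k).sum) := by
  have hR : PySem.List.pyRange 0 10 1 = [0,1,2,3,4,5,6,7,8,9] := by decide
  have hr : List.range' 1 10 = [1,2,3,4,5,6,7,8,9,10] := by decide
  simp [length_of_growth_at_steps_fn, hR, hr, List.foldl, PySem.List.slice_to]

-- the scatter loop characterised: adding xs entry-wise into s (indices k, k+1, …)
theorem pvAddInto_from (xs : List Int) : ∀ (k : Nat) (s : List Int), k + xs.length ≤ s.length →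
    (PySem.List.enumerate xs (k : Int)).foldl
        (fun s ix => s.set ix.1.toNat (s.getD ix.1.toNat 0 + ix.2)) s
      = s.take k ++ (List.zipWith (· + ·) (s.drop k) xs ++ (s.drop k).drop xs.length) := by
  induction xs with
  | nil => intro k s h; simp
  | cons x xs ih =>
    intro k s h
    simp only [List.length_cons] at h
    have hk : k < s.length := by omega
    rw [PySem.List.enumerate_cons, List.foldl_cons]
    have h1 : ((k : Int)).toNat = k := by simp
    have hgd : s.getD k 0 = s[k] := List.getD_eq_getElem s 0 hk
    have hcast : ((k : Int) + 1) = ((k + 1 : Nat) : Int) := by push_cast; ring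
    rw [h1, hgd, hcast, ih (k + 1) (s.set k (s[k] + x)) (by simp; omega)]
    have hset : s.set k (s[k] + x) = s.take k ++ (s[k] + x) :: s.drop (k + 1) := by
      rw [List.set_eq_take_append_cons_drop]; simp [hk]
    have hdropk : s.drop k = s[k] :: s.drop (k + 1) := List.drop_eq_getElem_cons hk
    rw [hset]
    rw [List.take_append, List.drop_append]
    simp only [List.length_take, Nat.min_eq_left (le_of_lt hk)]
    have ht1 : k + 1 - k = 1 := by omega
    rw [ht1, hdropk]
    simp only [List.take_take, Nat.min_eq_right (Nat.le_succ k),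
      List.drop_eq_nil_of_le
        (by simp [Nat.min_eq_left (le_of_lt hk)] : (List.take k s).length ≤ k + 1),
      List.take_succ_cons, List.take_zero, List.drop_succ_cons,
      List.zipWith_cons_cons, List.length_cons, List.nil_append]
    simp [List.append_assoc]

-- summing a clipped prefix of the scatter result splits into the two summands
theorem pv_sum_take_pad (b : List Int) : ∀ (a : List Int) (j : Nat), b.length ≤ a.length →
    ((List.zipWith (· + ·) a b ++ a.drop b.length).take j).sum
      = (a.take j).sum + (b.take j).sum := by
  induction b with
  | nil => intro a j h; simp
  | cons y ys ih =>
    intro a j h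
    match a with
    | [] => simp at h
    | x :: xs =>
      match j with
      | 0 => simp
      | j + 1 =>
        simp only [List.zipWith_cons_cons, List.length_cons, List.drop_succ_cons,
          List.cons_append, List.take_succ_cons, List.sum_cons]
        rw [ih xs j (by simpa using h)]
        ring

-- take j of (take 10 ++ padding) sums to (p.take j).sum for j ≤ 10
theorem pv_take_take_sum (p : List Int) (j : Nat) (hj : j ≤ 10) :
    ((p.take 10).take j).sum = (p.take j).sum := by
  rw [List.take_take, Nat.min_eq_left hj]

-- zipWith (+) against a long-enough zero list is the identity
theorem pv_zip_rep (xs : List Int) : ∀ n, xs.length ≤ n →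
    List.zipWith (· + ·) (List.replicate n (0:Int)) xs = xs := by
  induction xs with
  | nil => intro n _; simp
  | cons x xs ih =>
    intro n h
    match n with
    | 0 => simp at h
    | m + 1 =>
      simp only [List.replicate_succ, List.zipWith_cons_cons, zero_add]
      rw [ih m (by simpa using h)]

-- zero padding on the right never contributes to a prefix sum
theorem pv_pad_sum (xs : List Int) (m j : Nat) :
    ((xs ++ List.replicate m (0:Int)).take j).sum = (xs.take j).sum := by
  rw [List.take_append, List.sum_append, List.take_replicate, List.sum_replicate]
  simp

-- the cumulative fold over any list produces the prefix sums shifted by t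
theorem cum_fold (L : List Int) : ∀ (t : Int) (acc : List Int),
    (L.foldl (fun (st : Int × List Int) s => (st.1 + s, st.2 ++ [st.1 + s])) (t, acc)).2
      = acc ++ (List.range' 1 L.length).map (fun k => t + (L.take k).sum) := by
  induction L with
  | nil => intro t acc; simp
  | cons x xs ihL =>
    intro t acc
    rw [List.foldl_cons, ihL]
    simp only [List.length_cons, List.range'_succ, List.map_cons, List.range'_succ_left,
      List.map_map]
    simp [Function.comp, add_assoc]

-- B's side: the whole pipeline is the same map over [1..10]
theorem pvB_eq_map (p q : List Int) :
    length_of_growth_at_steps_fn_alt p q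
      = (List.range' 1 10).map (fun k => (p.take k).sum + (q.take k).sum) := by
  have hsp : PySem.List.slice p none (some 10) = p.take 10 := by
    rw [PySem.List.slice_to] <;> first | rfl | decide
  have hsq : PySem.List.slice q none (some 10) = q.take 10 := by
    rw [PySem.List.slice_to] <;> first | rfl | decide
  unfold length_of_growth_at_steps_fn_alt pvAddInto
  rw [hsp, hsq]
  have hp : (p.take 10).length ≤ 10 := by simp
  have hq : (q.take 10).length ≤ 10 := by simp
  have e1 := pvAddInto_from (p.take 10) 0 (List.replicate 10 (0:Int)) (by simp)
  simp only [Nat.cast_zero, List.take_zero, List.drop_zero, List.nil_append] at e1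
  rw [e1, pv_zip_rep (p.take 10) 10 hp, List.drop_replicate]
  have hlen1 : (p.take 10 ++ List.replicate (10 - (p.take 10).length) (0:Int)).length = 10 := by
    simp only [List.length_append, List.length_take, List.length_replicate]; omega
  have e2 := pvAddInto_from (q.take 10) 0
      (p.take 10 ++ List.replicate (10 - (p.take 10).length) (0:Int)) (by rw [hlen1]; omega)
  simp only [Nat.cast_zero, List.take_zero, List.drop_zero, List.nil_append] at e2
  rw [e2]
  set S : List Int := List.zipWith (· + ·)
      (p.take 10 ++ List.replicate (10 - (p.take 10).length) (0:Int)) (q.take 10)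
      ++ (p.take 10 ++ List.replicate (10 - (p.take 10).length) (0:Int)).drop (q.take 10).length
    with hS
  have hSlen : S.length = 10 := by
    rw [hS]; simp only [List.length_append, List.length_zipWith, List.length_take,
      List.length_replicate, List.length_drop]; omega
  have hSsum : ∀ j, j ≤ 10 → (S.take j).sum = (p.take j).sum + (q.take j).sum := by
    intro j hj
    rw [hS, pv_sum_take_pad (q.take 10) _ j (by rw [hlen1]; exact hq),
        pv_pad_sum, pv_take_take_sum p j hj, pv_take_take_sum q j hj]
  rw [cum_fold S 0 [], hSlen]
  simp only [List.nil_append, zero_add]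
  exact List.map_congr_left (fun k hk => by
    have hk10 : k ≤ 10 := by have := List.mem_range'_1.mp hk; omega
    rw [hSsum k hk10])
-- ===== VERDICT (by name: the statement is the Claim_ definition above) =====
theorem length_of_growth_at_steps_fn_spec : Claim_equal_length_of_growth_at_steps_fn := by
  intro p q _
  unfold Spec_length_of_growth_at_steps_fn
  rw [pvA_eq_map, pvB_eq_map]
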